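-- pv_equiv track=rewrite | github.com/Direct83/DailyDevDigestAi | src/domain/dedup.py | quick_duplicate_heuristic
-- ===== SOURCE A (Python) =====
-- from collections.abc import Iterable
--
-- def quick_duplicate_heuristic(candidate: str, recent_titles: Iterable[str]) -> bool:
--     """Быстрая ручная эвристика дублей на случай недоступности LLM.
--
--     Правило: если у кандидата ≥ 7 слов и хотя бы одно слово длиной ≥ 7 символов
--     встречается в любом из недавних заголовков, считаем дубликатом.
--     """
--     cand_tokens = [t for t in candidate.split() if t]
--     if len(cand_tokens) < 7:
--         return False
--     long_words = {t.lower() for t in cand_tokens if len(t) >= 7}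
--     if not long_words:
--         return False
--     for title in recent_titles:
--         lower = (title or "").lower()
--         if any(w in lower for w in long_words):
--             return True
--     return False
-- ===== SOURCE B (Python) =====
-- def quick_duplicate_heuristic(candidate, recent_titles):
--     tokens = candidate.split()
--     if len(tokens) < 7:
--         return False
--     blob = " ".join(t.lower() for t in recent_titles)
--     return any(len(t) >= 7 and t.lower() in blob for t in tokens)
-- ===== Notes on version B (the rewrite author's own statement) =====
-- stated objective: simpler
-- what changed: Replaces the per-title loop over a set of long words by one space-joined lowercased blob of all titles and a single any() over the candidate's tokens (no set, no empty-set gate, no token filter); safe because split() tokens never contain whitespace, so a long word cannot match across the space-joined title boundary.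
import Mathlib
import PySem

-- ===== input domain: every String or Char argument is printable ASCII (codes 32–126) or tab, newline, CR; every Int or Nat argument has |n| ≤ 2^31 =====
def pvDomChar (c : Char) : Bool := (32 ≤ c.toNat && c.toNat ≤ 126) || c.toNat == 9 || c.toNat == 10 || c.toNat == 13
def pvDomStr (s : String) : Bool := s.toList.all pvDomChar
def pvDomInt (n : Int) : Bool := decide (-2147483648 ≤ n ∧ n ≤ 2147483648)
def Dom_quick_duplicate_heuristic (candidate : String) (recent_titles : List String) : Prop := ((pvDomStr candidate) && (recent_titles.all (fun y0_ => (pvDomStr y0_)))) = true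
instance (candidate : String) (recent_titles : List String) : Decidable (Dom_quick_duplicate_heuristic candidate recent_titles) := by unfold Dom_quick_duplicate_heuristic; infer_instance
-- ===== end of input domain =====

-- B replaces the per-title scan over a set of long words by one space-joined lowercased blob
-- of all titles and a single any() over the candidate's tokens (objective: simpler).


-- ===== PORT A =====
def quick_duplicate_heuristic (candidate : String) (recent_titles : List String) : Bool :=
  let cand_tokens := (PySem.Str.split₀ candidate).filter (fun t => !(t == ""))
  if cand_tokens.length < 7 then false
  else
    let long_words : PySem.Set String :=
      PySem.Set.ofList ((cand_tokens.filter (fun t => decide (7 ≤ PySem.Str.len t))).map PySem.Str.lower)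
    if PySem.Set.len long_words = 0 then false
    else
      -- '(title or "")' equals title for every string (an empty title stays empty)
      recent_titles.any (fun title =>
        long_words.any (fun w => PySem.Str.isIn w (PySem.Str.lower title)))

-- ===== PORT B =====
def quick_duplicate_heuristic_alt (candidate : String) (recent_titles : List String) : Bool :=
  let tokens := PySem.Str.split₀ candidate
  if tokens.length < 7 then false
  else
    let blob := PySem.Str.join " " (recent_titles.map PySem.Str.lower)
    tokens.any (fun t => decide (7 ≤ PySem.Str.len t) && PySem.Str.isIn (PySem.Str.lower t) blob)

-- ===== PRECONDITION & SPEC =====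
def Spec_quick_duplicate_heuristic (candidate : String) (recent_titles : List String) (out : Bool) : Prop := out = quick_duplicate_heuristic_alt candidate recent_titles
instance (candidate : String) (recent_titles : List String) (out : Bool) : Decidable (Spec_quick_duplicate_heuristic candidate recent_titles out) := by unfold Spec_quick_duplicate_heuristic; infer_instance

-- ===== CLAIM (what is proved, stated in full; the proofs are below) =====
def Claim_equal_quick_duplicate_heuristic : Prop := ∀ (candidate : String) (recent_titles : List String), Dom_quick_duplicate_heuristic candidate recent_titles → Spec_quick_duplicate_heuristic candidate recent_titles (quick_duplicate_heuristic candidate recent_titles)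

-- ===== LEMMAS AND PROOFS =====

-- Every token produced by split() is nonempty and contains no whitespace character.
theorem split₀_go_tokens (rest : List Char) : ∀ (cur : List Char) (acc : List (List Char)),
    (∀ u ∈ acc, u ≠ [] ∧ ∀ c ∈ u, PySem.Chars.isspace c = false) →
    (∀ c ∈ cur, PySem.Chars.isspace c = false) →
    ∀ t ∈ PySem.Chars.split₀.go rest cur acc, t ≠ [] ∧ ∀ c ∈ t, PySem.Chars.isspace c = false := by
  induction rest with
  | nil =>
      intro cur acc hacc hcur t ht
      simp only [PySem.Chars.split₀.go] at ht
      by_cases hc : cur.isEmpty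
      · rw [if_pos hc] at ht
        exact hacc t (List.mem_reverse.mp ht)
      · rw [if_neg hc] at ht
        rcases List.mem_cons.mp (List.mem_reverse.mp ht) with h | h
        · subst h
          refine ⟨by simpa using (by simpa [List.isEmpty_iff] using hc), ?_⟩
          intro c hcmem
          exact hcur c (by simpa using hcmem)
        · exact hacc t h
  | cons a rest ih =>
      intro cur acc hacc hcur t ht
      simp only [PySem.Chars.split₀.go] at ht
      by_cases hsp : PySem.Chars.isspace a
      · simp only [hsp, if_true] at ht
        by_cases hc : cur.isEmpty
        · simp only [hc, if_true] at ht
          exact ih [] acc hacc (by simp) t ht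
        · simp only [hc, Bool.false_eq_true, if_false] at ht
          refine ih [] (cur.reverse :: acc) ?_ (by simp) t ht
          intro u hu
          rcases List.mem_cons.mp hu with hu | hu
          · subst hu
            refine ⟨by simpa using (by simpa [List.isEmpty_iff] using hc), ?_⟩
            intro c hcmem
            exact hcur c (by simpa using hcmem)
          · exact hacc u hu
      · simp only [hsp, Bool.false_eq_true, if_false] at ht
        refine ih (a :: cur) acc hacc ?_ t ht
        intro c hcmem
        rcases List.mem_cons.mp hcmem with hcmem | hcmem
        · simpa [hcmem] using (by simpa using hsp : PySem.Chars.isspace a = false)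
        · exact hcur c hcmem

theorem split₀_tokens (s : List Char) :
    ∀ t ∈ PySem.Chars.split₀ s, t ≠ [] ∧ ∀ c ∈ t, PySem.Chars.isspace c = false := by
  intro t ht
  exact split₀_go_tokens s [] [] (by simp) (by simp) t ht

-- A prefix that avoids the separator character stops before it.
theorem prefix_avoid_sep {α : Type} {c : α} (w : List α) (hw : c ∉ w) :
    ∀ (l1 l2 : List α), w <+: l1 ++ c :: l2 → w <+: l1 := by
  induction w with
  | nil => intro l1 l2 _; exact List.nil_prefix
  | cons b w' ih =>
      intro l1 l2 h
      cases l1 with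
      | nil =>
          rw [List.nil_append, List.cons_prefix_cons] at h
          exact absurd (h.1 ▸ List.mem_cons_self) hw
      | cons a l1' =>
          rw [List.cons_append, List.cons_prefix_cons] at h
          rw [List.cons_prefix_cons]
          exact ⟨h.1, ih (fun hm => hw (List.mem_cons_of_mem _ hm)) l1' l2 h.2⟩

-- An infix that avoids the separator lies entirely on one side of it.
theorem infix_avoid_sep {α : Type} {c : α} {w : List α} (hw : c ∉ w) :
    ∀ (l1 l2 : List α), w <:+: l1 ++ c :: l2 → w <:+: l1 ∨ w <:+: l2 := by
  intro l1
  induction l1 with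
  | nil =>
      intro l2 h
      rw [List.nil_append, List.infix_cons_iff] at h
      rcases h with h | h
      · cases w with
        | nil => exact Or.inr (List.nil_infix)
        | cons b w' =>
            rw [List.cons_prefix_cons] at h
            exact absurd (h.1 ▸ List.mem_cons_self) hw
      · exact Or.inr h
  | cons a l1' ih =>
      intro l2 h
      rw [List.cons_append, List.infix_cons_iff] at h
      rcases h with h | h
      · exact Or.inl (prefix_avoid_sep w hw (a :: l1') l2 (by simpa using h)).isInfix
      · rcases ih l2 h with h' | h'
        · exact Or.inl (List.infix_cons h')
        · exact Or.inr h'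

-- A nonempty, space-free word is an infix of the space-joined titles iff it is an infix of one title.
theorem infix_join_iff (w : List Char) (hw : w ≠ []) (hsp : ' ' ∉ w) :
    ∀ (ls : List (List Char)),
      (w <:+: PySem.Chars.join [' '] ls ↔ ∃ l ∈ ls, w <:+: l) := by
  intro ls
  induction ls with
  | nil => simp [PySem.Chars.join_nil, List.infix_nil, hw]
  | cons a t ih =>
      cases t with
      | nil => simp [PySem.Chars.join_singleton]
      | cons b t' =>
          rw [PySem.Chars.join_cons_cons]
          constructor
          · intro h
            have h' : w <:+: a ++ ' ' :: PySem.Chars.join [' '] (b :: t') := by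
              simpa using h
            rcases infix_avoid_sep hsp a _ h' with h1 | h1
            · exact ⟨a, by simp, h1⟩
            · rcases ih.mp h1 with ⟨l, hl, hwl⟩
              exact ⟨l, by simp [hl], hwl⟩
          · rintro ⟨l, hl, hwl⟩
            rcases List.mem_cons.mp hl with hl | hl
            · subst hl
              have ha : l <:+: l ++ [' '] ++ PySem.Chars.join [' '] (b :: t') := by
                rw [List.append_assoc]
                exact (List.prefix_append _ _).isInfix
              exact hwl.trans ha
            · have hj : w <:+: PySem.Chars.join [' '] (b :: t') := ih.mpr ⟨l, hl, hwl⟩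
              exact hj.trans (List.suffix_append _ _).isInfix

-- Lowercasing preserves space-freeness.
theorem lowerChar_ne_space {c : Char} (h : PySem.Chars.isspace c = false) :
    PySem.Chars.lowerChar c ≠ ' ' := by
  unfold PySem.Chars.lowerChar
  split_ifs with hu
  · intro he
    have hb : 'A' ≤ c ∧ c ≤ 'Z' := by
      simpa [PySem.Chars.isupper] using hu
    have h1 : 65 ≤ c.toNat := hb.1
    have h2 : c.toNat ≤ 90 := hb.2
    have hv : (c.toNat + 32).isValidChar := by
      left; omega
    have := congrArg Char.toNat he
    rw [Char.toNat_ofNat] at this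
    simp [hv] at this
    have : c.toNat + 32 = 32 := by simpa using this
    omega
  · intro he
    subst he
    simp [PySem.Chars.isspace] at h

theorem lower_no_space {l : List Char} (h : ∀ c ∈ l, PySem.Chars.isspace c = false) :
    ' ' ∉ PySem.Chars.lower l := by
  intro hm
  unfold PySem.Chars.lower at hm
  rcases List.mem_map.mp hm with ⟨c, hc, he⟩
  exact lowerChar_ne_space (h c hc) he

-- token membership at the String level
theorem mem_split₀_str {candidate t : String} (ht : t ∈ PySem.Str.split₀ candidate) :
    t.toList ≠ [] ∧ ∀ c ∈ t.toList, PySem.Chars.isspace c = false := by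
  have : t.toList ∈ PySem.Chars.split₀ candidate.toList := by
    rw [← PySem.Str.split₀_map_toList]
    exact List.mem_map_of_mem ht
  exact split₀_tokens _ _ this

-- ===== VERDICT (by name: the statement is the Claim_ definition above) =====
theorem quick_duplicate_heuristic_spec : Claim_equal_quick_duplicate_heuristic := by
  intro candidate recent_titles _
  unfold Spec_quick_duplicate_heuristic
  simp only [quick_duplicate_heuristic, quick_duplicate_heuristic_alt]
  have hfilter : (PySem.Str.split₀ candidate).filter (fun t => !(t == "")) = PySem.Str.split₀ candidate := by
    apply List.filter_eq_self.mpr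
    intro t ht
    have hne : t ≠ "" := by
      intro h
      exact (mem_split₀_str ht).1 (by simp [h])
    simp [hne]
  rw [hfilter]
  by_cases hlen : (PySem.Str.split₀ candidate).length < 7
  · simp [hlen]
  · simp only [hlen, if_false]
    by_cases hL : (PySem.Str.split₀ candidate).filter (fun t => decide (7 ≤ PySem.Str.len t)) = []
    · rw [hL]
      have : PySem.Set.len (PySem.Set.ofList (List.map PySem.Str.lower [])) = 0 := by
        simp [PySem.Set.ofList, PySem.Set.empty, PySem.Set.len]
      rw [if_pos this]
      have hall := List.filter_eq_nil_iff.mp hL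
      symm
      apply List.any_eq_false.mpr
      intro t ht
      have h := hall t ht
      simp only [decide_eq_true_eq] at h
      simp only [Bool.and_eq_true, decide_eq_true_eq, not_and]
      intro h7
      exact absurd h7 h
    · set L := List.map PySem.Str.lower ((PySem.Str.split₀ candidate).filter (fun t => decide (7 ≤ PySem.Str.len t))) with hLdef
      have hLne : L ≠ [] := by
        intro h
        exact hL (List.map_eq_nil_iff.mp h)
      have hset : PySem.Set.len (PySem.Set.ofList L) ≠ 0 := by
        rcases List.exists_mem_of_ne_nil L hLne with ⟨w, hwmem⟩
        have : w ∈ PySem.Set.ofList L := (PySem.Set.mem_ofList L w).mpr hwmem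
        have hne : PySem.Set.ofList L ≠ [] := by
          intro h; rw [h] at this; exact List.not_mem_nil this
        simp only [PySem.Set.len]
        exact_mod_cast fun h0 => hne (List.eq_nil_of_length_eq_zero (by exact_mod_cast h0))
      rw [if_neg hset]
      have hblob : (PySem.Str.join " " (recent_titles.map PySem.Str.lower)).toList
          = PySem.Chars.join [' '] (recent_titles.map (fun s => PySem.Chars.lower s.toList)) := by
        rw [PySem.Str.toList_join, List.map_map]
        refine congrArg _ (List.map_congr_left ?_)
        intro s _
        simp [PySem.Str.toList_lower]
      rw [Bool.eq_iff_iff]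
      simp only [List.any_eq_true]
      constructor
      · rintro ⟨title, htitle, w, hw, hin⟩
        rcases List.mem_map.mp ((PySem.Set.mem_ofList L w).mp hw) with ⟨t, htf, rfl⟩
        rcases List.mem_filter.mp htf with ⟨htm, hp⟩
        refine ⟨t, htm, ?_⟩
        rw [Bool.and_eq_true]
        refine ⟨hp, ?_⟩
        rw [PySem.Str.isIn_iff_infix, hblob]
        obtain ⟨htne, htns⟩ := mem_split₀_str htm
        have hne : (PySem.Str.lower t).toList ≠ [] := by
          rw [PySem.Str.toList_lower]
          simpa [PySem.Chars.lower] using htne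
        have hns : ' ' ∉ (PySem.Str.lower t).toList := by
          rw [PySem.Str.toList_lower]
          exact lower_no_space htns
        apply (infix_join_iff _ hne hns _).mpr
        refine ⟨(PySem.Chars.lower title.toList), List.mem_map_of_mem htitle, ?_⟩
        have h2 := (PySem.Str.isIn_iff_infix _ _).mp hin
        rw [PySem.Str.toList_lower, PySem.Str.toList_lower] at h2
        rw [PySem.Str.toList_lower]
        exact h2
      · rintro ⟨t, htm, hb⟩
        rw [Bool.and_eq_true] at hb
        obtain ⟨hp, hin⟩ := hb
        rw [PySem.Str.isIn_iff_infix, hblob] at hin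
        obtain ⟨htne, htns⟩ := mem_split₀_str htm
        have hne : (PySem.Str.lower t).toList ≠ [] := by
          rw [PySem.Str.toList_lower]
          simpa [PySem.Chars.lower] using htne
        have hns : ' ' ∉ (PySem.Str.lower t).toList := by
          rw [PySem.Str.toList_lower]
          exact lower_no_space htns
        rcases (infix_join_iff _ hne hns _).mp hin with ⟨l, hl, hwl⟩
        rcases List.mem_map.mp hl with ⟨title, htitle, rfl⟩
        refine ⟨title, htitle, PySem.Str.lower t, ?_, ?_⟩
        · exact (PySem.Set.mem_ofList L _).mpr
            (List.mem_map_of_mem (List.mem_filter.mpr ⟨htm, hp⟩))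
        · rw [PySem.Str.isIn_iff_infix, PySem.Str.toList_lower, PySem.Str.toList_lower]
          rw [PySem.Str.toList_lower] at hwl
          exact hwl
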